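-- pv_equiv track=rewrite | github.com/vinsidious/gac | src/gac/files.py | filter_files_by_patterns
-- ===== SOURCE A (Python) =====
-- from typing import Callable, Dict, List, Optional, Tuple, TypeVar
--
-- def file_matches_pattern(file_path: str, pattern: str) -> bool:
--     """
--     Check if a file matches a pattern.
--
--     Args:
--         file_path: Path to the file
--         pattern: Pattern to match (supports * wildcards)
--
--     Returns:
--         True if the file matches the pattern, False otherwise
--     """
--     if pattern.endswith("/*"):
--         # Directory pattern
--         dir_pattern = pattern[:-2]
--         return file_path.startswith(dir_pattern)
--     elif pattern.startswith("*"):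
--         # Extension pattern
--         return file_path.endswith(pattern[1:])
--     else:
--         # Exact match
--         return file_path == pattern
--
-- def filter_files_by_patterns(
--     files: List[str],
--     include_patterns: Optional[List[str]] = None,
--     exclude_patterns: Optional[List[str]] = None,
-- ) -> List[str]:
--     """
--     Filter files by include and exclude patterns.
--
--     Args:
--         files: List of file paths
--         include_patterns: Optional list of patterns to include
--         exclude_patterns: Optional list of patterns to exclude
--
--     Returns:
--         Filtered list of file paths
--     """
--     result = files
--
--     # Apply include patterns if specified
--     if include_patterns:
--         result = [
--             f
--             for f in result
--             if any(file_matches_pattern(f, pattern) for pattern in include_patterns)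
--         ]
--
--     # Apply exclude patterns if specified
--     if exclude_patterns:
--         result = [
--             f
--             for f in result
--             if not any(file_matches_pattern(f, pattern) for pattern in exclude_patterns)
--         ]
--
--     return result
-- ===== SOURCE B (Python) =====
-- def filter_files_by_patterns(files, include_patterns=None, exclude_patterns=None):
--     # Preprocess each pattern list once into (dir prefixes, extension suffixes,
--     # set of exact names), then filter in a single pass over files.
--     if not include_patterns and not exclude_patterns:
--         return files
--
--     def compile_patterns(patterns):
--         dirs, exts, exact = [], [], set()
--         for p in patterns:
--             if p.endswith("/*"):
--                 dirs.append(p[:-2])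
--             elif p.startswith("*"):
--                 exts.append(p[1:])
--             else:
--                 exact.add(p)
--         return tuple(dirs), tuple(exts), exact
--
--     inc = compile_patterns(include_patterns) if include_patterns else None
--     exc = compile_patterns(exclude_patterns) if exclude_patterns else None
--
--     def matches(f, compiled):
--         dirs, exts, exact = compiled
--         return f.startswith(dirs) or f.endswith(exts) or f in exact
--
--     return [
--         f
--         for f in files
--         if (inc is None or matches(f, inc)) and (exc is None or not matches(f, exc))
--     ]
-- ===== Notes on version B (the rewrite author's own statement) =====
-- stated objective: faster
-- what changed: Each pattern list is preprocessed once into (directory-prefix tuple, extension-suffix tuple, exact-name set) and the files are filtered in a single pass using startswith(tuple)/endswith(tuple)/set membership, instead of two filtering passes that re-classify every pattern per file via a Python-level helper call.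
import Mathlib
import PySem

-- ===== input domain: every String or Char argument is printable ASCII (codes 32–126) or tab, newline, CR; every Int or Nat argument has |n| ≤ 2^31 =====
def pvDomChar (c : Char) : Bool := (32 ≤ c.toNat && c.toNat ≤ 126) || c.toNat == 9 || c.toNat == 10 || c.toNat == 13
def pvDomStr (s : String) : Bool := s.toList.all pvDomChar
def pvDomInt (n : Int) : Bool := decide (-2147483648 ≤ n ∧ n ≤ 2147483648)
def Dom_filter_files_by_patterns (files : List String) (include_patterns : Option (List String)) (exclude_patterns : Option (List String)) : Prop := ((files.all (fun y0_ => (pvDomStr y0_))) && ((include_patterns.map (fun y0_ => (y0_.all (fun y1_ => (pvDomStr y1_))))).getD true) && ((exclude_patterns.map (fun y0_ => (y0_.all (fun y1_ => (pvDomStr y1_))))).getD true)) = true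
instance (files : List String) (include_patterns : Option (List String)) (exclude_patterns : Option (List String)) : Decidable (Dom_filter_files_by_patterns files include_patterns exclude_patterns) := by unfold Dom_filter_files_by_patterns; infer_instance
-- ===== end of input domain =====

-- B preprocesses each pattern list once into (dir-prefix list, extension-suffix list, exact-name set)
-- and filters the files in a single pass (idiomatic; A re-classifies every pattern per file, in two passes).


-- ===== PORT A =====
def file_matches_pattern (file_path : String) (pattern : String) : Bool :=
  if PySem.Str.endswith pattern "/*" then
    -- dir_pattern = pattern[:-2]
    PySem.Str.startswith file_path (PySem.Str.slice pattern none (some (-2)))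
  else if PySem.Str.startswith pattern "*" then
    PySem.Str.endswith file_path (PySem.Str.slice pattern (some 1) none)
  else
    file_path == pattern

def filter_files_by_patterns (files : List String) (include_patterns : Option (List String)) (exclude_patterns : Option (List String)) : List String :=
  let result := files
  -- if include_patterns: (truthy = some non-empty list)
  let result :=
    match include_patterns with
    | some ps =>
        if ps.isEmpty then result
        else result.filter (fun f => ps.any (fun pattern => file_matches_pattern f pattern))
    | none => result
  -- if exclude_patterns:
  let result :=
    match exclude_patterns with
    | some ps =>
        if ps.isEmpty then result
        else result.filter (fun f => !(ps.any (fun pattern => file_matches_pattern f pattern)))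
    | none => result
  result

-- ===== PORT B =====
-- compile_patterns: one pass over the pattern list, building (dirs, exts, exact-set)
def pvCompilePatterns (patterns : List String) : List String × List String × PySem.Set String :=
  patterns.foldl
    (fun acc p =>
      if PySem.Str.endswith p "/*" then
        (acc.1 ++ [PySem.Str.slice p none (some (-2))], acc.2.1, acc.2.2)
      else if PySem.Str.startswith p "*" then
        (acc.1, acc.2.1 ++ [PySem.Str.slice p (some 1) none], acc.2.2)
      else
        (acc.1, acc.2.1, PySem.Set.add acc.2.2 p))
    ([], [], PySem.Set.ofList [])

-- matches(f, compiled): f.startswith(dirs) or f.endswith(exts) or f in exact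
def pvMatches (f : String) (c : List String × List String × PySem.Set String) : Bool :=
  c.1.any (fun d => PySem.Str.startswith f d)
    || c.2.1.any (fun e => PySem.Str.endswith f e)
    || PySem.Set.contains c.2.2 f

def filter_files_by_patterns_alt (files : List String) (include_patterns : Option (List String)) (exclude_patterns : Option (List String)) : List String :=
  -- if not include_patterns and not exclude_patterns: return files
  let incTruthy := match include_patterns with | some ps => !ps.isEmpty | none => false
  let excTruthy := match exclude_patterns with | some ps => !ps.isEmpty | none => false
  if !incTruthy && !excTruthy then files
  else
    let inc : Option (List String × List String × PySem.Set String) :=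
      match include_patterns with
      | some ps => if ps.isEmpty then none else some (pvCompilePatterns ps)
      | none => none
    let exc : Option (List String × List String × PySem.Set String) :=
      match exclude_patterns with
      | some ps => if ps.isEmpty then none else some (pvCompilePatterns ps)
      | none => none
    files.filter (fun f =>
      (match inc with | none => true | some c => pvMatches f c)
        && (match exc with | none => true | some c => !pvMatches f c))

-- ===== PRECONDITION & SPEC =====
def Spec_filter_files_by_patterns (files : List String) (include_patterns : Option (List String)) (exclude_patterns : Option (List String)) (out : List String) : Prop := out = filter_files_by_patterns_alt files include_patterns exclude_patterns
instance (files : List String) (include_patterns : Option (List String)) (exclude_patterns : Option (List String)) (out : List String) : Decidable (Spec_filter_files_by_patterns files include_patterns exclude_patterns out) := by unfold Spec_filter_files_by_patterns; infer_instance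

-- ===== CLAIM (what is proved, stated in full; the proofs are below) =====
def Claim_equal_filter_files_by_patterns : Prop := ∀ (files : List String) (include_patterns : Option (List String)) (exclude_patterns : Option (List String)), Dom_filter_files_by_patterns files include_patterns exclude_patterns → Spec_filter_files_by_patterns files include_patterns exclude_patterns (filter_files_by_patterns files include_patterns exclude_patterns)

-- ===== LEMMAS AND PROOFS =====

-- B's compiled matcher agrees with A's per-pattern scan.
theorem pvMatches_step (f : String) (acc : List String × List String × PySem.Set String)
    (p : String) :
    pvMatches f
      (if PySem.Str.endswith p "/*" then
        (acc.1 ++ [PySem.Str.slice p none (some (-2))], acc.2.1, acc.2.2)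
      else if PySem.Str.startswith p "*" then
        (acc.1, acc.2.1 ++ [PySem.Str.slice p (some 1) none], acc.2.2)
      else
        (acc.1, acc.2.1, PySem.Set.add acc.2.2 p))
      = (pvMatches f acc || file_matches_pattern f p) := by
  unfold pvMatches file_matches_pattern
  split_ifs with h1 h2 <;>
    simp [beq_eq_decide, Bool.or_assoc, Bool.or_comm, Bool.or_left_comm]

theorem pvMatches_foldl (f : String) (ps : List String)
    (acc : List String × List String × PySem.Set String) :
    pvMatches f (ps.foldl
      (fun acc p =>
        if PySem.Str.endswith p "/*" then
          (acc.1 ++ [PySem.Str.slice p none (some (-2))], acc.2.1, acc.2.2)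
        else if PySem.Str.startswith p "*" then
          (acc.1, acc.2.1 ++ [PySem.Str.slice p (some 1) none], acc.2.2)
        else
          (acc.1, acc.2.1, PySem.Set.add acc.2.2 p)) acc)
      = (pvMatches f acc || ps.any (fun p => file_matches_pattern f p)) := by
  induction ps generalizing acc with
  | nil => simp
  | cons p ps ih =>
      simp only [List.foldl_cons, List.any_cons, ih, pvMatches_step, Bool.or_assoc]

-- B's compiled matcher agrees with A's per-pattern scan.
theorem pvMatches_compile (f : String) (ps : List String) :
    pvMatches f (pvCompilePatterns ps) = ps.any (fun p => file_matches_pattern f p) := by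
  unfold pvCompilePatterns
  rw [pvMatches_foldl]
  simp [pvMatches, PySem.Set.ofList]

-- ===== VERDICT (by name: the statement is the Claim_ definition above) =====
theorem filter_files_by_patterns_spec : Claim_equal_filter_files_by_patterns := by
  intro files inc exc _
  unfold Spec_filter_files_by_patterns filter_files_by_patterns filter_files_by_patterns_alt
  cases inc with
  | none =>
      cases exc with
      | none => simp
      | some qs =>
          by_cases hq : qs.isEmpty <;>
            simp [hq, pvMatches_compile]
  | some ps =>
      cases exc with
      | none =>
          by_cases hp : ps.isEmpty <;>
            simp [hp, pvMatches_compile]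
      | some qs =>
          by_cases hp : ps.isEmpty <;> by_cases hq : qs.isEmpty <;>
            simp [hp, hq, pvMatches_compile, List.filter_filter, Bool.and_comm]
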